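-- pv_equiv track=rewrite | github.com/pachorip/pehchan | pehchan/PehchanDatabase.py | order_kmer_by_freq
-- ===== SOURCE A (Python) =====
-- def order_kmer_by_freq(kmer_frequencies):
--     frequencies_to_kmers = {}
--     for kmer,kmer_frequency in kmer_frequencies.items():
--         if kmer_frequency in frequencies_to_kmers:
--             frequencies_to_kmers[kmer_frequency].append(kmer)
--         else:
--             frequencies_to_kmers[kmer_frequency] = [kmer]
--     return frequencies_to_kmers
-- ===== SOURCE B (Python) =====
-- def order_kmer_by_freq(kmer_frequencies):
--     items = list(kmer_frequencies.items())
--     distinct = dict.fromkeys(f for _, f in items)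
--     return {f: [k for k, g in items if g == f] for f in distinct}
-- ===== Notes on version B (the rewrite author's own statement) =====
-- stated objective: alternative
-- what changed: Replaces the incremental hash-grouping loop (append-or-create per item) by a two-phase build: first dedupe the frequencies in first-occurrence order, then construct each group at once with a per-frequency filter comprehension.
import Mathlib
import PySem

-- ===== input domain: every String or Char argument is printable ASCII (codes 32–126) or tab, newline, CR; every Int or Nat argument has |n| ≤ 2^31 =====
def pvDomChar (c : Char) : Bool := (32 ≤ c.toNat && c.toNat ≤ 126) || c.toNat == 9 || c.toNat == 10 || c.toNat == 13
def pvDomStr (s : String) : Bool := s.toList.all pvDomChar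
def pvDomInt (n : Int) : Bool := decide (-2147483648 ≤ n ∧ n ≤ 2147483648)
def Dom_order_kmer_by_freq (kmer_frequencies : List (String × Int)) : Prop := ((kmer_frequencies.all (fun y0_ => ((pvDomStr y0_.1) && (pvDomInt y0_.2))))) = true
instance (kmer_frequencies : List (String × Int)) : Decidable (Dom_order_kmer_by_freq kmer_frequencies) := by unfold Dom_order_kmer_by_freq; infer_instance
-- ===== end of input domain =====

-- B replaces A's incremental append-or-create dict loop by a two-phase build (dedupe
-- the frequencies in first-occurrence order, then one filter per frequency); objective: alternative.


-- ===== PORT A =====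
-- for kmer, kmer_frequency in kmer_frequencies.items(): append to the existing group or create it
def order_kmer_by_freq (kmer_frequencies : List (String × Int)) : List (Int × List String) :=
  (kmer_frequencies.foldl
    (fun (d : PySem.Dict Int (List String)) (p : String × Int) =>
      if d.contains p.2 then d.modify p.2 [] (fun ks => ks ++ [p.1])
      else d.insert p.2 [p.1])
    PySem.Dict.empty).items

-- ===== PORT B =====
-- distinct = dict.fromkeys(frequencies); {f: [k for k, g in items if g == f] for f in distinct}
def order_kmer_by_freq_alt (kmer_frequencies : List (String × Int)) : List (Int × List String) :=
  (PySem.List.dedup (kmer_frequencies.map (·.2))).map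
    (fun f => (f, (kmer_frequencies.filter (fun p => p.2 == f)).map (·.1)))

-- ===== PRECONDITION & SPEC =====
def Spec_order_kmer_by_freq (kmer_frequencies : List (String × Int)) (out : List (Int × List String)) : Prop := out = order_kmer_by_freq_alt kmer_frequencies
instance (kmer_frequencies : List (String × Int)) (out : List (Int × List String)) : Decidable (Spec_order_kmer_by_freq kmer_frequencies out) := by unfold Spec_order_kmer_by_freq; infer_instance

-- ===== CLAIM (what is proved, stated in full; the proofs are below) =====
def Claim_equal_order_kmer_by_freq : Prop := ∀ (kmer_frequencies : List (String × Int)), Dom_order_kmer_by_freq kmer_frequencies → Spec_order_kmer_by_freq kmer_frequencies (order_kmer_by_freq kmer_frequencies)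

-- ===== LEMMAS AND PROOFS =====

-- A's loop body, named for the proofs
def pvStep (d : PySem.Dict Int (List String)) (p : String × Int) : PySem.Dict Int (List String) :=
  if d.contains p.2 then d.modify p.2 [] (fun ks => ks ++ [p.1])
  else d.insert p.2 [p.1]

lemma pvDedup_append (xs : List Int) (x : Int) :
    PySem.List.dedup (xs ++ [x]) =
      if x ∈ PySem.List.dedup xs then PySem.List.dedup xs else PySem.List.dedup xs ++ [x] := by
  simp only [PySem.List.dedup_eq_ofList, PySem.Set.ofList, List.foldl_append, List.foldl_cons,
    List.foldl_nil, PySem.Set.add]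
  split_ifs with h h' h' <;> simp_all

-- the loop invariant: items of the built dict are B's grouping, and the keys stay nodup
lemma pvBuild_invariant (l : List (String × Int)) :
    (l.foldl pvStep PySem.Dict.empty).items = order_kmer_by_freq_alt l ∧
      (l.foldl pvStep PySem.Dict.empty).keys.Nodup := by
  induction l using List.reverseRecOn with
  | nil => exact ⟨rfl, PySem.Dict.nodup_keys_empty⟩
  | append_singleton l q ih =>
    obtain ⟨hitems, hnd⟩ := ih
    obtain ⟨k, f⟩ := q
    set d := l.foldl pvStep PySem.Dict.empty with hd
    have hkeys : d.keys = PySem.List.dedup (l.map (·.2)) := by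
      show d.items.map Prod.fst = _
      rw [hitems]; simp [order_kmer_by_freq_alt, Function.comp_def]
    have hmem_keys : ∀ f' : Int, f' ∈ d.keys ↔ f' ∈ PySem.List.dedup (l.map (·.2)) := by
      intro f'; rw [hkeys]
    rw [List.foldl_append, List.foldl_cons, List.foldl_nil]
    show (pvStep d (k, f)).items = order_kmer_by_freq_alt (l ++ [(k, f)]) ∧
      (pvStep d (k, f)).keys.Nodup
    unfold pvStep
    by_cases hc : d.contains f = true
    · -- existing frequency: append k to its group
      have hfmem : f ∈ PySem.List.dedup (l.map (·.2)) :=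
        (hmem_keys f).mp ((PySem.Dict.contains_iff_mem_keys d f).mp hc)
      have hpair : (f, (l.filter (fun p => p.2 == f)).map (·.1)) ∈ d.items := by
        rw [hitems]; unfold order_kmer_by_freq_alt
        exact List.mem_map_of_mem hfmem
      have hgetD : d.getD f [] = (l.filter (fun p => p.2 == f)).map (·.1) :=
        PySem.Dict.getD_of_mem_items d hpair hnd []
      have hmod : d.modify f [] (fun ks => ks ++ [k]) =
          d.insert f ((l.filter (fun p => p.2 == f)).map (·.1) ++ [k]) := by
        show d.insert f (d.getD f [] ++ [k]) = _
        rw [hgetD]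
      simp only [hc, if_true, hmod]
      constructor
      · rw [PySem.Dict.items_insert_of_contains d _ hc, hitems]
        unfold order_kmer_by_freq_alt
        simp only [List.map_append, List.map_cons, List.map_nil, List.filter_append,
          List.filter_cons, List.filter_nil]
        rw [pvDedup_append, if_pos hfmem, List.map_map]
        apply List.map_congr_left
        intro f' _
        by_cases hf' : f' = f
        · subst hf'; simp
        · simp [hf', Ne.symm hf', beq_iff_eq]
      · exact PySem.Dict.nodup_keys_insert d f _ hnd
    · -- new frequency: create the group [k]
      have hc' : d.contains f = false := by simpa using hc
      have hfnot : f ∉ PySem.List.dedup (l.map (·.2)) := by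
        intro hmem
        exact hc ((PySem.Dict.contains_iff_mem_keys d f).mpr ((hmem_keys f).mpr hmem))
      have hfnot' : f ∉ l.map (·.2) := fun h => hfnot ((PySem.List.mem_dedup _ _).mpr h)
      have hfilt : l.filter (fun p => p.2 == f) = [] := by
        rw [List.filter_eq_nil_iff]
        intro p hp hpf
        exact hfnot' (List.mem_map.mpr ⟨p, hp, by simpa [beq_iff_eq] using hpf⟩)
      simp only [hc', Bool.false_eq_true, if_false]
      constructor
      · rw [PySem.Dict.items_insert_of_not_contains d _ hc', hitems]
        unfold order_kmer_by_freq_alt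
        simp only [List.map_append, List.map_cons, List.map_nil, List.filter_append,
          List.filter_cons, List.filter_nil]
        rw [pvDedup_append, if_neg hfnot, List.map_append]
        congr 1
        · apply List.map_congr_left
          intro f' hf'mem
          have : f' ≠ f := fun h => hfnot (h ▸ hf'mem)
          simp [Ne.symm this, beq_iff_eq]
        · simp [hfilt]
      · exact PySem.Dict.nodup_keys_insert d f _ hnd

-- ===== VERDICT (by name: the statement is the Claim_ definition above) =====
theorem order_kmer_by_freq_spec : Claim_equal_order_kmer_by_freq := by
  intro kf _
  show order_kmer_by_freq kf = order_kmer_by_freq_alt kf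
  have : order_kmer_by_freq kf = (kf.foldl pvStep PySem.Dict.empty).items := rfl
  rw [this]
  exact (pvBuild_invariant kf).1
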